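-- pv_equiv track=rewrite | github.com/pedro2004-ro/tallerDeGit | guia8.py | sacar_espacios
-- ===== SOURCE A (Python) =====
-- def sacar_espacios(linea: str) -> str:
--     res: str = ""
--     p: bool = False
--     i: int = 0
--
--     for i in linea:
--         if p and i == ' ':
--             res += i
--         if i != ' ':
--             res += i
--             p = True
--
--     return res
-- ===== SOURCE B (Python) =====
-- def sacar_espacios(linea: str) -> str:
--     i = 0
--     n = len(linea)
--     while i < n and linea[i] == ' ':
--         i += 1
--     return linea[i:]
-- ===== Notes on version B (the rewrite author's own statement) =====
-- stated objective: simpler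
-- what changed: B finds the boundary of the leading spaces with an index-advancing while loop and returns one slice linea[i:], instead of A's character-by-character accumulation into a result string with a 'seen non-space' flag.
import Mathlib
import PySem

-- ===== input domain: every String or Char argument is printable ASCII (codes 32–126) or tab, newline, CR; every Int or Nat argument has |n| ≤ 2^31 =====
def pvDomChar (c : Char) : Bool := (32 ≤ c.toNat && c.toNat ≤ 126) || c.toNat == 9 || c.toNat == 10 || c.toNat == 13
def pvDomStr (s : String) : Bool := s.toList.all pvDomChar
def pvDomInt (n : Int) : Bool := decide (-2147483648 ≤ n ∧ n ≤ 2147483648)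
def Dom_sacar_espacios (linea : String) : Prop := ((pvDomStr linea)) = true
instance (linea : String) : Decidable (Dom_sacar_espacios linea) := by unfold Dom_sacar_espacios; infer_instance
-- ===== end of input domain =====

-- ===== PORT A =====
-- B changes: index-scan + one slice instead of A's char-by-char accumulation (objective: simpler).
-- A: accumulates characters into res with a 'seen non-space' flag p; Python str concat is ported
-- as a List Char accumulator with a final String.ofList (exact: same characters in the same order).
def aStep (st : List Char × Bool) (c : Char) : List Char × Bool :=
  let res := if st.2 && (c == ' ') then st.1 ++ [c] else st.1
  if c ≠ ' ' then (res ++ [c], true) else (res, st.2)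

def sacar_espacios (linea : String) : String :=
  String.ofList (linea.toList.foldl aStep ([], false)).1

-- ===== PORT B =====
-- while i < n and linea[i] == ' ': i += 1  — ported as structural recursion over the remaining
-- characters carrying the index i (the loop reads only linea[i], i.e. the head of the remainder).
def altSkip : List Char → Nat → Nat
  | [], i => i
  | c :: rest, i => if c = ' ' then altSkip rest (i + 1) else i

-- linea[i:] with 0 ≤ i ≤ len(linea) is exactly dropping the first i characters.
def sacar_espacios_alt (linea : String) : String :=
  String.ofList (linea.toList.drop (altSkip linea.toList 0))

-- ===== PRECONDITION & SPEC =====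
def Spec_sacar_espacios (linea : String) (out : String) : Prop := out = sacar_espacios_alt linea
instance (linea : String) (out : String) : Decidable (Spec_sacar_espacios linea out) := by unfold Spec_sacar_espacios; infer_instance

-- ===== CLAIM (what is proved, stated in full; the proofs are below) =====
def Claim_equal_sacar_espacios : Prop := ∀ (linea : String), Dom_sacar_espacios linea → Spec_sacar_espacios linea (sacar_espacios linea)

-- ===== LEMMAS AND PROOFS =====

-- once the flag is true, A appends every remaining character
theorem aFold_true (cs : List Char) (res : List Char) :
    (cs.foldl aStep (res, true)).1 = res ++ cs := by
  induction cs generalizing res with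
  | nil => simp
  | cons c rest ih =>
    by_cases h : c = ' ' <;> simp [List.foldl, aStep, h, ih]

theorem altSkip_succ (cs : List Char) (i : Nat) :
    altSkip cs (i + 1) = altSkip cs i + 1 := by
  induction cs generalizing i with
  | nil => simp [altSkip]
  | cons c rest ih =>
    by_cases h : c = ' ' <;> simp [altSkip, h, ih]

theorem main_lemma (cs : List Char) :
    (cs.foldl aStep ([], false)).1 = cs.drop (altSkip cs 0) := by
  induction cs with
  | nil => simp [altSkip]
  | cons c rest ih =>
    by_cases h : c = ' '
    · simp [List.foldl, aStep, h, altSkip, altSkip_succ, ih]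
    · simp [List.foldl, aStep, h, altSkip, aFold_true]

-- ===== VERDICT (by name: the statement is the Claim_ definition above) =====
theorem sacar_espacios_spec : Claim_equal_sacar_espacios := by
  intro linea _
  unfold Spec_sacar_espacios sacar_espacios sacar_espacios_alt
  rw [main_lemma]
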